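-- pv_equiv track=rewrite | github.com/bubpen/codekata | 프로그래머스/0/181836. 그림 확대/그림 확대.py | solution
-- ===== SOURCE A (Python) =====
-- def solution(picture, k):
--     answer = []
--     for i in range(len(picture)*k):
--         answer.append('')
--     for i in range(len(answer)):
--         for s in picture[i//k]:
--             for n in range(k):
--                 answer[i] = answer[i] + s
--     return answer
-- ===== SOURCE B (Python) =====
-- def solution(picture, k):
--     answer = []
--     for row in picture:
--         scaled = ''.join(ch * k for ch in row)
--         answer.extend([scaled] * k)
--     return answer
-- ===== Notes on version B (the rewrite author's own statement) =====
-- stated objective: simpler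
-- what changed: Iterates over the original rows, building each horizontally-scaled row once and replicating it k times, instead of A's pass over all output indices with i//k back-indexing and per-output-row recomputation of the scaled row.
import Mathlib
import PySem

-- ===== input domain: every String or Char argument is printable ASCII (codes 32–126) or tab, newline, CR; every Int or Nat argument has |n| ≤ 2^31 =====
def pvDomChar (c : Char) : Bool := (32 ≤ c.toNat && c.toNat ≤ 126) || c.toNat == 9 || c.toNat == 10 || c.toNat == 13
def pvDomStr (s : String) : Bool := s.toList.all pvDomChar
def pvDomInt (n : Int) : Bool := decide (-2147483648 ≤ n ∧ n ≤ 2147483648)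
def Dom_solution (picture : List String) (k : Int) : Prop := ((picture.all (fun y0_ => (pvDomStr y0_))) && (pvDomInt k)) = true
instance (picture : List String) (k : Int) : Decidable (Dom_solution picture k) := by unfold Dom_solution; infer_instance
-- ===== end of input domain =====

-- B builds each horizontally-scaled row once and replicates it k times, instead of A's
-- loop over output indices with i//k back-indexing and per-duplicate recomputation (objective: simpler).

-- ===== PORT A =====
-- cell strings are carried as List Char inside the loop (Lean's String.append is kernel-opaque;
-- 'answer[i] = answer[i] + s' appends one character, exact) and converted back with String.ofList at the end.
def solution (picture : List String) (k : Int) : List String :=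
  let answer0 : List (List Char) :=
    (PySem.List.pyRange 0 (picture.length * k) 1).map (fun _ => ([] : List Char))
  let answer :=
    (PySem.List.pyRange 0 (answer0.length : Int) 1).foldl
      (fun ans i =>
        ((PySem.List.pyGetD picture (PySem.Int.floordiv i k) "").toList).foldl
          (fun ans s =>
            (PySem.List.pyRange 0 k 1).foldl
              (fun ans _ =>
                PySem.List.pySetD ans i (PySem.List.pyGetD ans i [] ++ [s]))
              ans)
          ans)
      answer0
  answer.map (fun cs => String.ofList cs)

-- ===== PORT B =====
def solution_alt (picture : List String) (k : Int) : List String :=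
  picture.foldl
    (fun answer row =>
      let scaled := String.ofList (row.toList.flatMap (fun ch => PySem.List.pyRepeat [ch] k))
      answer ++ PySem.List.pyRepeat [scaled] k)
    []

-- ===== PRECONDITION & SPEC =====
def Spec_solution (picture : List String) (k : Int) (out : List String) : Prop := out = solution_alt picture k
instance (picture : List String) (k : Int) (out : List String) : Decidable (Spec_solution picture k out) := by unfold Spec_solution; infer_instance

-- ===== CLAIM (what is proved, stated in full; the proofs are below) =====
def Claim_equal_solution : Prop := ∀ (picture : List String) (k : Int), Dom_solution picture k → Spec_solution picture k (solution picture k)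

-- ===== LEMMAS AND PROOFS =====

-- write / read the cell at position done.length
theorem pv_set_at (done : List (List Char)) (x : List Char) (rest : List (List Char)) (v : List Char) :
    PySem.List.pySetD (done ++ x :: rest) (done.length : Int) v = done ++ v :: rest := by
  simp

theorem pv_getD_at (done : List (List Char)) (x : List Char) (rest : List (List Char)) :
    PySem.List.pyGetD (done ++ x :: rest) (done.length : Int) ([] : List Char) = x := by
  simp [List.getD]

-- innermost loop of A: 'for n in range(k): answer[i] = answer[i] + s' appends replicate K s at cell i
theorem pv_inner1 (K : Nat) (s : Char) (done : List (List Char)) (x : List Char) (rest : List (List Char)) :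
    (PySem.List.pyRange 0 (K : Int) 1).foldl
      (fun a _ => PySem.List.pySetD a (done.length : Int)
        (PySem.List.pyGetD a (done.length : Int) [] ++ [s]))
      (done ++ x :: rest)
    = done ++ (x ++ List.replicate K s) :: rest := by
  induction K generalizing x with
  | zero => simp [PySem.List.pyRange_one_eq_nil]
  | succ n ih =>
    have h : ((n + 1 : Nat) : Int) = (n : Int) + 1 := by push_cast; ring
    rw [h, PySem.List.pyRange_one_succ_right (by positivity), List.foldl_append, ih]
    simp only [List.foldl_cons, List.foldl_nil, pv_getD_at, pv_set_at, List.replicate_succ',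
      List.append_assoc]

-- middle loop of A: 'for s in picture[i//k]: …' appends the horizontally-scaled row at cell i
theorem pv_inner2 (K : Nat) (cs : List Char) (done : List (List Char)) (x : List Char) (rest : List (List Char)) :
    cs.foldl
      (fun a s =>
        (PySem.List.pyRange 0 (K : Int) 1).foldl
          (fun a' _ => PySem.List.pySetD a' (done.length : Int)
            (PySem.List.pyGetD a' (done.length : Int) [] ++ [s]))
          a)
      (done ++ x :: rest)
    = done ++ (x ++ cs.flatMap (fun c => List.replicate K c)) :: rest := by
  induction cs generalizing x with
  | nil => simp
  | cons c cs ih => rw [List.foldl_cons, pv_inner1, ih]; simp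

-- outer loop of A: output cell number done.length + t receives rows(done.length + t), scaled; the prefix is never touched again
theorem pv_outer (K : Nat) (rows : Int → List Char) (r : Nat) (done : List (List Char)) :
    (PySem.List.pyRange (done.length : Int) ((done.length + r : Nat) : Int) 1).foldl
      (fun ans i =>
        (rows i).foldl
          (fun a s =>
            (PySem.List.pyRange 0 (K : Int) 1).foldl
              (fun a' _ => PySem.List.pySetD a' i (PySem.List.pyGetD a' i [] ++ [s]))
              a)
          ans)
      (done ++ List.replicate r [])
    = done ++ (List.range r).map
        (fun t => (rows ((done.length + t : Nat) : Int)).flatMap (fun c => List.replicate K c)) := by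
  induction r generalizing done with
  | zero => simp [PySem.List.pyRange_one_eq_nil]
  | succ n ih =>
    have hlt : (done.length : Int) < ((done.length + (n + 1) : Nat) : Int) := by push_cast; omega
    rw [PySem.List.pyRange_one_cons hlt, List.foldl_cons, List.replicate_succ, pv_inner2]
    have h1 : (done.length : Int) + 1 = (((done ++ [List.flatMap (fun c => List.replicate K c) (rows (done.length : Int))]).length : Nat) : Int) := by
      simp
    have h2 : ((done.length + (n + 1) : Nat) : Int)
        = (((done ++ [List.flatMap (fun c => List.replicate K c) (rows (done.length : Int))]).length + n : Nat) : Int) := by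
      simp; ring
    have h3 : done ++ (List.flatMap (fun c => List.replicate K c) (rows (done.length : Int))) :: List.replicate n []
        = (done ++ [List.flatMap (fun c => List.replicate K c) (rows (done.length : Int))]) ++ List.replicate n ([] : List Char) := by
      simp
    rw [List.nil_append, h1, h2, h3, ih]
    simp [List.range_succ_eq_map, Function.comp]
    intro a _
    congr 2
    omega

-- index arithmetic: reading the t-th output row back from the original picture
theorem pv_comb {β : Type} (f : String → β) (d : String) (K : Nat) (hK : 0 < K) :
    ∀ picture : List String,
      (List.range (picture.length * K)).map (fun t => f (picture.getD (t / K) d))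
        = picture.flatMap (fun row => List.replicate K (f row)) := by
  intro picture
  induction picture with
  | nil => simp
  | cons row rest ih =>
    have hlen : (row :: rest).length * K = K + rest.length * K := by
      simp [Nat.succ_mul, Nat.add_comm]
    rw [hlen, List.range_add, List.map_append, List.flatMap_cons]
    congr 1
    · have : ∀ t ∈ List.range K, f ((row :: rest).getD (t / K) d) = f row := by
        intro t ht
        rw [Nat.div_eq_of_lt (List.mem_range.mp ht)]
        rfl
      rw [List.map_congr_left this, List.map_const', List.length_range]
    · rw [List.map_map]
      have : ∀ t ∈ List.range (rest.length * K),
          ((fun t => f ((row :: rest).getD (t / K) d)) ∘ fun x => K + x) t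
            = f (rest.getD (t / K) d) := by
        intro t _
        have : (K + t) / K = t / K + 1 := by
          rw [Nat.add_comm, Nat.add_div_right _ hK]
        simp [Function.comp, this]
      rw [List.map_congr_left this, ih]

-- ===== VERDICT (by name: the statement is the Claim_ definition above) =====
theorem solution_spec : Claim_equal_solution := by
  intro picture k _
  unfold Spec_solution solution solution_alt
  simp only [PySem.List.pyRepeat_singleton]
  rw [PySem.List.foldl_append_eq_flatMap]
  by_cases hk : k ≤ 0
  · have h0 : k.toNat = 0 := Int.toNat_of_nonpos hk
    have hL : (picture.length : Int) * k ≤ 0 :=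
      mul_nonpos_of_nonneg_of_nonpos (by positivity) hk
    simp [PySem.List.pyRange_one_eq_nil hL, PySem.List.pyRange_one_eq_nil (le_refl (0:Int)), h0]
  · have hkpos : 0 < k := by omega
    set K := k.toNat with hKdef
    have hkK : k = (K : Int) := (Int.toNat_of_nonneg hkpos.le).symm
    have hKpos : 0 < K := by omega
    have hlenR : (PySem.List.pyRange 0 ((picture.length : Int) * k) 1).length
        = picture.length * K := by
      rw [PySem.List.length_pyRange_one, hkK]
      omega
    have hlen0 : ((PySem.List.pyRange 0 ((picture.length : Int) * k) 1).map
        (fun _ => ([] : List Char))).length = picture.length * K := by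
      rw [List.length_map, hlenR]
    have hrep : (PySem.List.pyRange 0 ((picture.length : Int) * k) 1).map (fun _ => ([] : List Char))
        = List.replicate (picture.length * K) ([] : List Char) := by
      rw [List.map_const', hlenR]
    rw [hlen0, hrep]
    have hout := pv_outer K
      (fun i => (PySem.List.pyGetD picture (PySem.Int.floordiv i k) "").toList)
      (picture.length * K) ([] : List (List Char))
    simp only [List.length_nil, Nat.zero_add, Nat.cast_zero, List.nil_append] at hout
    rw [hkK] at hout ⊢
    rw [hout, List.map_map, List.nil_append]
    rw [← pv_comb (fun row => String.ofList (row.toList.flatMap (fun c => List.replicate K c))) "" K hKpos picture]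
    apply List.map_congr_left
    intro t ht
    simp [Function.comp, List.getD, -Int.natCast_ediv]
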